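-- pv_equiv track=rewrite | github.com/infomuscle/algorithms-programmers | programmers-python/kakao_2018_3_5.py | convert_chords
-- ===== SOURCE A (Python) =====
-- def convert_chords(chords: str):
--     converted = []
--
--     stack = []
--     for chord in chords:
--         if chord == "#" or len(stack) == 0:
--             stack.append(chord)
--             continue
--         else:
--             tmp = ""
--             while len(stack) > 0:
--                 tmp += stack.pop()
--             converted.append(tmp[::-1])
--             stack.append(chord)
--     if len(stack) > 0:
--         tmp = ""
--         while len(stack) > 0:
--             tmp += stack.pop()
--         converted.append(tmp[::-1])
--
--     return converted
-- ===== SOURCE B (Python) =====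
-- def convert_chords(chords: str):
--     tokens = []
--     i = 0
--     n = len(chords)
--     while i < n:
--         j = i + 1
--         while j < n and chords[j] == '#':
--             j += 1
--         tokens.append(chords[i:j])
--         i = j
--     return tokens
-- ===== Notes on version B (the rewrite author's own statement) =====
-- stated objective: simpler
-- what changed: Replaced the stack push/pop-and-double-reverse accumulation with a direct two-pointer scan that advances past each token's trailing run of sharp signs and emits the slice; no stack, no pop loop, no string reversal.
import Mathlib
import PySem

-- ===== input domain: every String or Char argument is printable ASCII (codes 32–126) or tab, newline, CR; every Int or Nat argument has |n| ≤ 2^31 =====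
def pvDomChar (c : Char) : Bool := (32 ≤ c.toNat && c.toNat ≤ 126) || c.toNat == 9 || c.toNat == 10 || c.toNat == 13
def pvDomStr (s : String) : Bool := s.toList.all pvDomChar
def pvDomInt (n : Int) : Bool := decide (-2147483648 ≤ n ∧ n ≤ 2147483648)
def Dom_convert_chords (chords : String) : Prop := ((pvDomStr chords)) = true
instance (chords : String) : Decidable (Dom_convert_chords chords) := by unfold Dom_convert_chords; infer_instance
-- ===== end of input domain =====

-- B replaces A's stack push/pop-and-double-reverse grouping by a direct scan
-- that emits each starter character together with its trailing run of '#' (simpler).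


-- ===== PORT A =====
-- loop body: push '#' (or any char onto an empty stack); otherwise flush the stack
-- (tmp accumulates pops, i.e. stack.reverse; tmp[::-1] reverses it back) and restart with c
def pvStepA (st : List String × List Char) (c : Char) : List String × List Char :=
  if c == '#' || st.2.length == 0 then (st.1, st.2 ++ [c])
  else (st.1 ++ [String.ofList ((st.2.reverse).reverse)], [c])

-- trailing 'if len(stack) > 0: … converted.append(tmp[::-1])'
def pvFinA (st : List String × List Char) : List String :=
  if st.2.length > 0 then st.1 ++ [String.ofList ((st.2.reverse).reverse)] else st.1

def convert_chords (chords : String) : List String :=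
  pvFinA (chords.toList.foldl pvStepA ([], []))

-- ===== PORT B =====
-- B's scan: token = chords[i:j] where j advances past the run of '#' after position i
def pvScanB : List Char → List String
  | [] => []
  | c :: rest =>
      String.ofList (c :: rest.takeWhile (fun d => d == '#'))
        :: pvScanB (rest.dropWhile (fun d => d == '#'))
  termination_by l => l.length
  decreasing_by
    simpa using Nat.lt_succ_of_le (List.length_dropWhile_le _ rest)

def convert_chords_alt (chords : String) : List String :=
  pvScanB chords.toList

-- ===== PRECONDITION & SPEC =====
def Spec_convert_chords (chords : String) (out : List String) : Prop := out = convert_chords_alt chords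
instance (chords : String) (out : List String) : Decidable (Spec_convert_chords chords out) := by unfold Spec_convert_chords; infer_instance

-- ===== CLAIM (what is proved, stated in full; the proofs are below) =====
def Claim_equal_convert_chords : Prop := ∀ (chords : String), Dom_convert_chords chords → Spec_convert_chords chords (convert_chords chords)

-- ===== LEMMAS AND PROOFS =====

-- invariant of A's loop: with a nonempty stack s, finishing the fold flushes
-- s extended by the pending '#'-run, then behaves like B's scan on the remainder
theorem pvFoldA_flush (l : List Char) (conv : List String) (s : List Char) (hs : s ≠ []) :
    pvFinA (l.foldl pvStepA (conv, s)) =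
      conv ++ String.ofList (s ++ l.takeWhile (fun d => d == '#'))
               :: pvScanB (l.dropWhile (fun d => d == '#')) := by
  induction l generalizing conv s with
  | nil =>
      conv_rhs => rw [pvScanB.eq_def]
      simp [pvFinA, List.length_pos_iff, hs]
  | cons c rest ih =>
      by_cases hc : c = '#'
      · subst hc
        have hstep : pvStepA (conv, s) '#' = (conv, s ++ ['#']) := by
          simp [pvStepA]
        rw [List.foldl_cons, hstep, ih conv (s ++ ['#']) (by simp)]
        simp
      · have hstep : pvStepA (conv, s) c =
            (conv ++ [String.ofList ((s.reverse).reverse)], [c]) := by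
          simp [pvStepA, hc, List.length_eq_zero_iff, hs]
        rw [List.foldl_cons, hstep,
          ih (conv ++ [String.ofList ((s.reverse).reverse)]) [c] (by simp)]
        conv_rhs => rw [pvScanB.eq_def]
        simp [hc]

-- ===== VERDICT (by name: the statement is the Claim_ definition above) =====
theorem convert_chords_spec : Claim_equal_convert_chords := by
  intro chords _
  unfold Spec_convert_chords convert_chords convert_chords_alt
  cases h : chords.toList with
  | nil => rw [pvScanB.eq_def]; simp [pvFinA]
  | cons c rest =>
      have hstep : pvStepA ([], []) c = ([], [c]) := by simp [pvStepA]
      rw [List.foldl_cons, hstep, pvFoldA_flush rest [] [c] (by simp)]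
      conv_rhs => rw [pvScanB.eq_def]
      simp
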